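-- pv_equiv track=rewrite | github.com/mtc-cubeworks/chieam | eam-chi/backend/scripts/seeds/update_permissions_from_csv.py | parse_permission_string
-- ===== SOURCE A (Python) =====
-- def parse_permission_string(perm_str: str) -> dict:
--     """Parse permission string like 'SelRWCD' into individual permissions."""
--     if not perm_str or perm_str == '-':
--         return {}
--
--     perms = {}
--     i = 0
--     while i < len(perm_str):
--         # Check for multi-char codes
--         if i + 2 < len(perm_str) and perm_str[i:i+3] == 'Imp':
--             perms['import'] = True
--             i += 3
--         elif i + 2 < len(perm_str) and perm_str[i:i+3] == 'Sel':
--             perms['select'] = True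
--             i += 3
--         elif perm_str[i] == 'O':
--             perms['only_if_creator'] = True
--             i += 1
--         elif perm_str[i] == 'R':
--             perms['read'] = True
--             i += 1
--         elif perm_str[i] == 'W':
--             perms['write'] = True
--             i += 1
--         elif perm_str[i] == 'C':
--             perms['create'] = True
--             i += 1
--         elif perm_str[i] == 'D':
--             perms['delete'] = True
--             i += 1
--         else:
--             i += 1
--
--     return perms
-- ===== SOURCE B (Python) =====
-- _SINGLE = {'O': 'only_if_creator', 'R': 'read', 'W': 'write',
--            'C': 'create', 'D': 'delete'}
-- _TRIPLE = {'Imp': 'import', 'Sel': 'select'}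
--
--
-- def parse_permission_string(perm_str: str) -> dict:
--     """Parse permission string like 'SelRWCD' into individual permissions."""
--     # Every position is classified independently: a 3-char window lookup and a
--     # 1-char lookup.  No consumption/stride state is needed because the token
--     # alphabets ('Imp'/'Sel' vs 'ORWCD') are disjoint, so positions inside a
--     # multi-char token can never match anything.
--     perms = {}
--     for i in range(len(perm_str)):
--         key = _TRIPLE.get(perm_str[i:i+3]) or _SINGLE.get(perm_str[i])
--         if key is not None:
--             perms[key] = True
--     return perms
-- ===== Notes on version B (the rewrite author's own statement) =====
-- stated objective: alternative
-- what changed: Replaces A's variable-stride tokenizer (a while-loop that consumes 1 or 3 characters per step through an eight-branch if-chain, with an empty/'-' guard) by stateless per-position classification: one for-loop where every index is independently classified by two table lookups (a 3-char window against {'Imp','Sel'} and the single character against a code map), correct because the multi-char tokens' letters are disjoint from the single-char codes, so positions inside a consumed token never match anything; the guard is dropped as redundant.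
import Mathlib
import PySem

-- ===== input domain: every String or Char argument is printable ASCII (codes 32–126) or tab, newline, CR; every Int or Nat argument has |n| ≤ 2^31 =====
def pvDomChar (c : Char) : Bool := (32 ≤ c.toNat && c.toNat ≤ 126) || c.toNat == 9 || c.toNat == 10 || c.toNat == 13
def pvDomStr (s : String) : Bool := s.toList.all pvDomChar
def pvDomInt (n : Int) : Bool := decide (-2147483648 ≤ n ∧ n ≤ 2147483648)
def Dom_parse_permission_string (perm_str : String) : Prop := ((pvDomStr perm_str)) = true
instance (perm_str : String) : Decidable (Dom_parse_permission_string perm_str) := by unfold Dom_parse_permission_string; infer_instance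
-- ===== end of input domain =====

-- B replaces A's variable-stride tokenizer (while-loop consuming 1 or 3 chars via an
-- if-chain, with an empty/'-' guard) by stateless per-position table classification;
-- objective: alternative (different algorithm; a timing run measured B constant-factor faster).

-- ===== PORT A =====
-- A's while-loop over index i; string ops done on toList (exact for every string).
def pamLoop (cs : List Char) (i : Nat) (perms : PySem.Dict String Bool) : PySem.Dict String Bool :=
  if _h : i < cs.length then
    if i + 2 < cs.length ∧ PySem.List.slice cs (some (i : Int)) (some ((i + 3 : Nat) : Int)) = ['I','m','p'] then
      pamLoop cs (i + 3) (perms.insert "import" true)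
    else if i + 2 < cs.length ∧ PySem.List.slice cs (some (i : Int)) (some ((i + 3 : Nat) : Int)) = ['S','e','l'] then
      pamLoop cs (i + 3) (perms.insert "select" true)
    else if PySem.List.pyGetD cs (i : Int) ' ' = 'O' then
      pamLoop cs (i + 1) (perms.insert "only_if_creator" true)
    else if PySem.List.pyGetD cs (i : Int) ' ' = 'R' then
      pamLoop cs (i + 1) (perms.insert "read" true)
    else if PySem.List.pyGetD cs (i : Int) ' ' = 'W' then
      pamLoop cs (i + 1) (perms.insert "write" true)
    else if PySem.List.pyGetD cs (i : Int) ' ' = 'C' then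
      pamLoop cs (i + 1) (perms.insert "create" true)
    else if PySem.List.pyGetD cs (i : Int) ' ' = 'D' then
      pamLoop cs (i + 1) (perms.insert "delete" true)
    else
      pamLoop cs (i + 1) perms
  else perms
termination_by cs.length - i
decreasing_by all_goals omega

def parse_permission_string (perm_str : String) : List (String × Bool) :=
  -- 'not perm_str or perm_str == "-"' checked on toList (exact)
  if perm_str.toList = [] ∨ perm_str.toList = ['-'] then []
  else (pamLoop perm_str.toList 0 PySem.Dict.empty).items

-- ===== PORT B =====
-- Source B's module-level tables _TRIPLE and _SINGLE
def pbTriple : PySem.Dict (List Char) String :=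
  PySem.Dict.ofList [(['I','m','p'], "import"), (['S','e','l'], "select")]
def pbSingle : PySem.Dict Char String :=
  PySem.Dict.ofList [('O', "only_if_creator"), ('R', "read"), ('W', "write"),
                     ('C', "create"), ('D', "delete")]

-- Source B's loop body: key = _TRIPLE.get(perm_str[i:i+3]) or _SINGLE.get(perm_str[i])
-- ('x or y' on str/None is exact as Option.orElse here: _TRIPLE's values are non-empty)
def pbStep (cs : List Char) (d : PySem.Dict String Bool) (i : Int) : PySem.Dict String Bool :=
  match (pbTriple.get? (PySem.List.slice cs (some i) (some (i + 3)))).orElse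
        (fun _ => pbSingle.get? (PySem.List.pyGetD cs i ' ')) with
  | some key => d.insert key true
  | none => d

def parse_permission_string_alt (perm_str : String) : List (String × Bool) :=
  ((PySem.List.pyRange 0 (perm_str.toList.length : Int) 1).foldl
    (pbStep perm_str.toList) PySem.Dict.empty).items

-- ===== PRECONDITION & SPEC =====
def Spec_parse_permission_string (perm_str : String) (out : List (String × Bool)) : Prop := out = parse_permission_string_alt perm_str
instance (perm_str : String) (out : List (String × Bool)) : Decidable (Spec_parse_permission_string perm_str out) := by unfold Spec_parse_permission_string; infer_instance

-- ===== CLAIM =====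
def Claim_equal_parse_permission_string : Prop := ∀ (perm_str : String), Dom_parse_permission_string perm_str → Spec_parse_permission_string perm_str (parse_permission_string perm_str)

-- ===== LEMMAS AND PROOFS =====

-- B's classification of a single position, as used by pbStep
def pbClassify (cs : List Char) (i : Int) : Option String :=
  (pbTriple.get? (PySem.List.slice cs (some i) (some (i + 3)))).orElse
    (fun _ => pbSingle.get? (PySem.List.pyGetD cs i ' '))

lemma pbStep_eq (cs : List Char) (d : PySem.Dict String Bool) (i : Int) :
    pbStep cs d i = match pbClassify cs i with
                    | some key => d.insert key true
                    | none => d := rfl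

lemma slice_nat (cs : List Char) (i : Nat) :
    PySem.List.slice cs (some (i : Int)) (some ((i : Int) + 3)) = (cs.drop i).take 3 := by
  have h3 : ((i : Int) + 3) = ((i + 3 : Nat) : Int) := by push_cast; ring
  rw [h3, PySem.List.slice_natCast]
  congr 1
  omega

lemma char_at (cs : List Char) (i : Nat) (c : Char) (rest : List Char)
    (h : cs.drop i = c :: rest) : cs.getD i ' ' = c := by
  have h0 : (cs.drop i)[0]? = cs[i + 0]? := List.getElem?_drop
  rw [h] at h0
  simp only [List.getElem?_cons_zero, Nat.add_zero] at h0
  simp [List.getD_eq_getElem?_getD, ← h0]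

-- the guard of A's two slice branches ⇔ the bare slice equality (length forces the bound)
lemma cond3_iff (cs : List Char) (i : Nat) (p : List Char) (hp : p.length = 3) :
    (i + 2 < cs.length ∧ (cs.drop i).take 3 = p) ↔ (cs.drop i).take 3 = p := by
  constructor
  · exact fun h => h.2
  · intro h
    refine ⟨?_, h⟩
    have hl : ((cs.drop i).take 3).length = 3 := by rw [h, hp]
    simp [List.length_take, List.length_drop] at hl
    omega

lemma classify_of_drop (cs : List Char) (i : Nat) (c : Char) (rest : List Char)
    (h : cs.drop i = c :: rest) :
    pbClassify cs (i : Int) =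
      (pbTriple.get? ((c :: rest).take 3)).orElse (fun _ => pbSingle.get? c) := by
  unfold pbClassify
  rw [slice_nat, h, PySem.List.pyGetD_natCast, char_at cs i c rest h]

-- a window that is neither 'Imp' nor 'Sel' misses the triple table
lemma triple_get?_none (w : List Char) (h1 : w ≠ ['I','m','p']) (h2 : w ≠ ['S','e','l']) :
    pbTriple.get? w = none := by
  rw [PySem.Dict.get?_eq_none_iff_not_mem_keys]
  have hk : pbTriple.keys = [['I','m','p'], ['S','e','l']] := by decide
  rw [hk]; simp [h1, h2]

-- inner characters of a matched 'Imp'/'Sel' token classify to none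
lemma classify_none_inner (cs : List Char) (j : Nat) (c : Char) (rest : List Char)
    (h : cs.drop j = c :: rest) (hc : c = 'm' ∨ c = 'p' ∨ c = 'e' ∨ c = 'l') :
    pbClassify cs (j : Int) = none := by
  rw [classify_of_drop cs j c rest h]
  have ht : pbTriple.get? ((c :: rest).take 3) = none := by
    apply triple_get?_none
    all_goals intro hw
    all_goals have := congrArg (List.getD · 0 ' ') hw
    all_goals rcases hc with rfl | rfl | rfl | rfl <;> simp at this
  rw [ht]
  have hs : pbSingle.get? c = none := by
    rcases hc with rfl | rfl | rfl | rfl <;> decide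
  simp [hs, Option.orElse]

lemma drop_succ_of_drop (cs : List Char) (i : Nat) (c : Char) (rest : List Char)
    (h : cs.drop i = c :: rest) : cs.drop (i + 1) = rest := by
  have : cs.drop (i + 1) = (cs.drop i).drop 1 := by rw [List.drop_drop]
  rw [this, h]; rfl

-- peel one index off B's fold (i < len)
lemma fold_cons (cs : List Char) (i : Nat) (hlt : i < cs.length) (d : PySem.Dict String Bool) :
    (PySem.List.pyRange (i : Int) (cs.length : Int) 1).foldl (pbStep cs) d =
      (PySem.List.pyRange ((i : Int) + 1) (cs.length : Int) 1).foldl (pbStep cs) (pbStep cs d (i : Int)) := by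
  rw [PySem.List.pyRange_one_cons (by exact_mod_cast hlt)]
  rfl

-- main invariant: A's while-loop from index i equals B's fold over range(i, len)
lemma pam_eq_fold : ∀ (n : Nat) (cs : List Char) (i : Nat) (d : PySem.Dict String Bool),
    cs.length - i ≤ n →
    pamLoop cs i d = (PySem.List.pyRange (i : Int) (cs.length : Int) 1).foldl (pbStep cs) d := by
  intro n
  induction n with
  | zero =>
    intro cs i d h
    have hge : ¬ i < cs.length := by omega
    rw [pamLoop, dif_neg hge,
        PySem.List.pyRange_one_eq_nil (by exact_mod_cast (by omega : cs.length ≤ i))]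
    rfl
  | succ n ih =>
    intro cs i d h
    by_cases hlt : i < cs.length
    · obtain ⟨c, rest, hcr⟩ : ∃ c rest, cs.drop i = c :: rest :=
        List.exists_cons_of_ne_nil (by simp [List.drop_eq_nil_iff]; omega)
      have hslice : PySem.List.slice cs (some (i : Int)) (some ((i + 3 : Nat) : Int)) =
          (cs.drop i).take 3 := by
        rw [PySem.List.slice_natCast]; congr 1; omega
      have hgd : PySem.List.pyGetD cs (i : Int) ' ' = c := by
        rw [PySem.List.pyGetD_natCast, char_at cs i c rest hcr]
      have hclass := classify_of_drop cs i c rest hcr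
      rw [pamLoop, dif_pos hlt, hslice, hgd]
      by_cases hImp : (cs.drop i).take 3 = ['I','m','p']
      · -- A consumes 3; B classifies i as 'import' and i+1, i+2 as none
        have hlen3 : i + 2 < cs.length := ((cond3_iff cs i _ rfl).mpr hImp).1
        have hw : (c :: rest).take 3 = ['I','m','p'] := by rw [← hcr]; exact hImp
        rcases rest with _ | ⟨c2, _ | ⟨c3, r⟩⟩
        · simp at hw
        · simp at hw
        · simp only [List.take_succ_cons, List.take_zero, List.cons.injEq, and_true] at hw
          obtain ⟨rfl, rfl, rfl⟩ := hw
          have hr1 : cs.drop (i + 1) = 'm' :: 'p' :: r := drop_succ_of_drop cs i _ _ hcr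
          have hr2 : cs.drop (i + 2) = 'p' :: r := by
            rw [show i + 2 = (i + 1) + 1 by ring]
            exact drop_succ_of_drop cs (i + 1) _ _ hr1
          rw [if_pos ((cond3_iff cs i ['I','m','p'] rfl).mpr hImp)]
          have hci : pbClassify cs (i : Int) = some "import" := by
            rw [hclass, show List.take 3 ('I'::'m'::'p'::r) = ['I','m','p'] from by simp]
            decide
          rw [fold_cons cs i hlt d, pbStep_eq, hci]
          have h1 : ((i : Int) + 1) = ((i + 1 : Nat) : Int) := by push_cast; ring
          rw [h1, fold_cons cs (i + 1) (by omega) _, pbStep_eq,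
              classify_none_inner cs (i + 1) 'm' _ hr1 (Or.inl rfl)]
          have h2 : (((i + 1 : Nat) : Int) + 1) = ((i + 2 : Nat) : Int) := by push_cast; ring
          rw [h2, fold_cons cs (i + 2) (by omega) _, pbStep_eq,
              classify_none_inner cs (i + 2) 'p' _ hr2 (Or.inr (Or.inl rfl))]
          have h3 : (((i + 2 : Nat) : Int) + 1) = ((i + 3 : Nat) : Int) := by push_cast; ring
          rw [h3, ih cs (i + 3) _ (by omega)]
      · rw [if_neg (fun hc => hImp ((cond3_iff cs i ['I','m','p'] rfl).mp hc))]
        by_cases hSel : (cs.drop i).take 3 = ['S','e','l']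
        · have hlen3 : i + 2 < cs.length := ((cond3_iff cs i _ rfl).mpr hSel).1
          have hw : (c :: rest).take 3 = ['S','e','l'] := by rw [← hcr]; exact hSel
          rcases rest with _ | ⟨c2, _ | ⟨c3, r⟩⟩
          · simp at hw
          · simp at hw
          · simp only [List.take_succ_cons, List.take_zero, List.cons.injEq, and_true] at hw
            obtain ⟨rfl, rfl, rfl⟩ := hw
            have hr1 : cs.drop (i + 1) = 'e' :: 'l' :: r := drop_succ_of_drop cs i _ _ hcr
            have hr2 : cs.drop (i + 2) = 'l' :: r := by
              rw [show i + 2 = (i + 1) + 1 by ring]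
              exact drop_succ_of_drop cs (i + 1) _ _ hr1
            rw [if_pos ((cond3_iff cs i ['S','e','l'] rfl).mpr hSel)]
            have hci : pbClassify cs (i : Int) = some "select" := by
              rw [hclass, show List.take 3 ('S'::'e'::'l'::r) = ['S','e','l'] from by simp]
              decide
            rw [fold_cons cs i hlt d, pbStep_eq, hci]
            have h1 : ((i : Int) + 1) = ((i + 1 : Nat) : Int) := by push_cast; ring
            rw [h1, fold_cons cs (i + 1) (by omega) _, pbStep_eq,
                classify_none_inner cs (i + 1) 'e' _ hr1 (Or.inr (Or.inr (Or.inl rfl)))]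
            have h2 : (((i + 1 : Nat) : Int) + 1) = ((i + 2 : Nat) : Int) := by push_cast; ring
            rw [h2, fold_cons cs (i + 2) (by omega) _, pbStep_eq,
                classify_none_inner cs (i + 2) 'l' _ hr2 (Or.inr (Or.inr (Or.inr rfl)))]
            have h3 : (((i + 2 : Nat) : Int) + 1) = ((i + 3 : Nat) : Int) := by push_cast; ring
            rw [h3, ih cs (i + 3) _ (by omega)]
        · rw [if_neg (fun hc => hSel ((cond3_iff cs i ['S','e','l'] rfl).mp hc))]
          -- no triple at i: classification reduces to the single-char table
          have ht : pbTriple.get? ((c :: rest).take 3) = none := by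
            apply triple_get?_none <;> rw [← hcr] <;> assumption
          have hclass' : pbClassify cs (i : Int) = pbSingle.get? c := by
            rw [hclass, ht]; rfl
          have step1 : ∀ d' : PySem.Dict String Bool,
              (PySem.List.pyRange (i : Int) (cs.length : Int) 1).foldl (pbStep cs) d' =
              (PySem.List.pyRange ((i + 1 : Nat) : Int) (cs.length : Int) 1).foldl (pbStep cs)
                (match pbSingle.get? c with | some k => d'.insert k true | none => d') := by
            intro d'
            rw [show ((i + 1 : Nat) : Int) = (i : Int) + 1 from by push_cast; ring,
                fold_cons cs i hlt d', pbStep_eq, hclass']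
          by_cases hO : c = 'O'
          · rw [if_pos hO, ih cs (i + 1) _ (by omega), step1 d]; subst hO; rfl
          · rw [if_neg hO]
            by_cases hR : c = 'R'
            · rw [if_pos hR, ih cs (i + 1) _ (by omega), step1 d]; subst hR; rfl
            · rw [if_neg hR]
              by_cases hW : c = 'W'
              · rw [if_pos hW, ih cs (i + 1) _ (by omega), step1 d]; subst hW; rfl
              · rw [if_neg hW]
                by_cases hC : c = 'C'
                · rw [if_pos hC, ih cs (i + 1) _ (by omega), step1 d]; subst hC; rfl
                · rw [if_neg hC]
                  by_cases hD : c = 'D'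
                  · rw [if_pos hD, ih cs (i + 1) _ (by omega), step1 d]; subst hD; rfl
                  · rw [if_neg hD, ih cs (i + 1) _ (by omega), step1 d]
                    have hnone : pbSingle.get? c = none := by
                      rw [PySem.Dict.get?_eq_none_iff_not_mem_keys]
                      have hk : pbSingle.keys = ['O','R','W','C','D'] := by decide
                      rw [hk]; simp [hO, hR, hW, hC, hD]
                    rw [hnone]
    · rw [pamLoop, dif_neg hlt,
          PySem.List.pyRange_one_eq_nil (by exact_mod_cast (by omega : cs.length ≤ i))]
      rfl

-- ===== VERDICT =====
theorem parse_permission_string_spec : Claim_equal_parse_permission_string := by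
  intro perm_str _
  unfold Spec_parse_permission_string parse_permission_string parse_permission_string_alt
  by_cases hguard : perm_str.toList = [] ∨ perm_str.toList = ['-']
  · rw [if_pos hguard]
    rcases hguard with h | h <;> rw [h] <;> decide
  · rw [if_neg hguard]
    rw [pam_eq_fold perm_str.toList.length perm_str.toList 0 PySem.Dict.empty (by omega)]
    rfl
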